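-- pv_equiv track=rewrite | github.com/landron/Problems | hackerrank/algo/easy/easy_alternate_letters_string.py | eliminate_consecutive_characters
-- ===== SOURCE A (Python) =====
-- def eliminate_consecutive_characters(s):
--     prev = 0
--     eliminate = []
--     for i in s:
--         if i == prev:
--            eliminate.append(i)
--         prev = i
--     while eliminate:
--         for j in eliminate:
--             s = s.replace(j, '')
--         eliminate = []
--         prev = 0
--         for i in s:
--             if i == prev:
--                 eliminate.append(i)
--             prev = i
--     return s
-- ===== SOURCE B (Python) =====
-- def eliminate_consecutive_characters(s):
--     # A character c must be eliminated exactly when two occurrences of c are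
--     # separated only by eliminated characters.  Extract, once, a Horn clause
--     # (gap-set -> c) for each pair of consecutive equal characters, then
--     # compute the closure by unit propagation with watch lists -- no repeated
--     # passes over the string and no string rewriting.
--     clauses = []
--     for i in range(len(s)):
--         c = s[i]
--         gap = set()
--         found = False
--         for j in range(i + 1, len(s)):
--             if s[j] == c:
--                 found = True
--                 break
--             gap.add(s[j])
--         if found:
--             clauses.append((gap, c))
--     watch = {}
--     gaps = []
--     removed = set()
--     queue = []
--     for idx, (gap, c) in enumerate(clauses):
--         gaps.append(set(gap))
--         for x in gap:
--             watch.setdefault(x, []).append(idx)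
--         if not gap and c not in removed:
--             removed.add(c)
--             queue.append(c)
--     while queue:
--         x = queue.pop()
--         for idx in watch.get(x, []):
--             g = gaps[idx]
--             g.discard(x)
--             if not g and clauses[idx][1] not in removed:
--                 removed.add(clauses[idx][1])
--                 queue.append(clauses[idx][1])
--     return ''.join(ch for ch in s if ch not in removed)
-- ===== Notes on version B (the rewrite author's own statement) =====
-- stated objective: alternative
-- what changed: B never rewrites or re-scans the string to a fixpoint: it extracts once, per pair of consecutive equal characters, a Horn clause (set of characters strictly between -> that character) and computes the set of eliminated characters as the clause closure by watch-list unit propagation, then filters the original string once; A instead repeatedly rewrites s with replace and re-scans for adjacent duplicates.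
import Mathlib
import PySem

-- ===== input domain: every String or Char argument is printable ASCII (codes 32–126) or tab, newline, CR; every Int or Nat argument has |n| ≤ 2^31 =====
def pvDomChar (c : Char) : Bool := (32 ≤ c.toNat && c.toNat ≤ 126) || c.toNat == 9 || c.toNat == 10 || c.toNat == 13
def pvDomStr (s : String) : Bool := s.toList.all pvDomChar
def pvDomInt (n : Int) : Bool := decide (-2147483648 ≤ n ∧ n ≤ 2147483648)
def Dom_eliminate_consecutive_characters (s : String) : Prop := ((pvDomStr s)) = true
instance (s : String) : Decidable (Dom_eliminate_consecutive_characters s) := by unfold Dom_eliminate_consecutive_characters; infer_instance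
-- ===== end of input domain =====

-- B replaces A's rewrite-and-rescan fixpoint by a one-shot reduction to Horn-clause
-- closure: one clause (characters strictly between -> character) per pair of consecutive
-- equal characters, closed by watch-list unit propagation; objective: alternative.

-- ===== PORT A =====
-- 'for i in s: if i == prev: eliminate.append(i); prev = i'; the sentinel prev = 0 (an int)
-- never equals a character, modelled by the initial 'none'
def pvPassA (prev : Option Char) (acc : List Char) : List Char → List Char
  | [] => acc
  | i :: rest => pvPassA (some i) (if some i = prev then acc ++ [i] else acc) rest

-- 'for j in eliminate: s = s.replace(j, "")' — replacing a single character by '' is exactly a filter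
def pvRemoveA (l : List Char) (e : List Char) : List Char :=
  e.foldl (fun s j => s.filter (fun c => c ≠ j)) l

-- termination helpers for the 'while eliminate:' loop (cited in decreasing_by)
theorem pvPassA_mem {x : Char} : ∀ (l : List Char) (prev : Option Char) (acc : List Char),
    x ∈ pvPassA prev acc l → x ∈ acc ∨ x ∈ l := by
  intro l
  induction l with
  | nil => intro prev acc h; exact Or.inl h
  | cons i rest ih =>
    intro prev acc h
    rcases ih (some i) _ h with h' | h'
    · by_cases hc : some i = prev
      · simp [hc] at h'
        rcases h' with h' | h'
        · exact Or.inl h'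
        · exact Or.inr (by simp [h'])
      · simp [hc] at h'
        exact Or.inl h'
    · exact Or.inr (List.mem_cons_of_mem _ h')

theorem pvRemoveA_length_le (e : List Char) : ∀ (l : List Char),
    (pvRemoveA l e).length ≤ l.length := by
  induction e with
  | nil => intro l; simp [pvRemoveA]
  | cons j rest ih =>
    intro l
    calc (pvRemoveA l (j :: rest)).length
        = (pvRemoveA (l.filter (fun c => c ≠ j)) rest).length := rfl
      _ ≤ (l.filter (fun c => c ≠ j)).length := ih _
      _ ≤ l.length := List.length_filter_le _ _

theorem pvRemoveA_length_lt {l e : List Char} (he : e ≠ []) (hj : e.head he ∈ l) :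
    (pvRemoveA l e).length < l.length := by
  obtain ⟨j, rest, hcons⟩ := List.exists_cons_of_ne_nil he
  subst hcons
  simp only [List.head_cons] at hj
  calc (pvRemoveA l (j :: rest)).length
      = (pvRemoveA (l.filter (fun c => c ≠ j)) rest).length := rfl
    _ ≤ (l.filter (fun c => c ≠ j)).length := pvRemoveA_length_le _ _
    _ < l.length := by
        apply List.length_filter_lt_length_iff_exists.mpr
        exact ⟨j, hj, by simp⟩

-- 'while eliminate: remove all collected characters, recompute eliminate'
def pvLoopA (l : List Char) : List Char :=
  let e := pvPassA none [] l
  if h : e = [] then l else pvLoopA (pvRemoveA l e)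
termination_by l.length
decreasing_by
  have hj : e.head h ∈ l := by
    rcases pvPassA_mem l none [] (List.head_mem h) with h' | h'
    · cases h'
    · exact h'
  exact pvRemoveA_length_lt h hj

def eliminate_consecutive_characters (s : String) : String :=
  String.ofList (pvLoopA s.toList)

-- ===== PORT B =====
-- inner scan 'for j in range(i+1, len(s)): if s[j] == c: found; break; gap.add(s[j])':
-- returns the gap set up to the next occurrence of c, or none if c does not reappear
def pvGapOf (c : Char) : List Char → PySem.Set Char → Option (PySem.Set Char)
  | [], _ => none
  | x :: r, g => if x = c then some g else pvGapOf c r (PySem.Set.add g x)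

-- outer clause-extraction loop 'for i in range(len(s)):' — one step per suffix s[i:]
def pvClauses : List Char → List (PySem.Set Char × Char)
  | [] => []
  | c :: r =>
    (match pvGapOf c r PySem.Set.empty with
     | some g => [(g, c)]
     | none => []) ++ pvClauses r

-- 'for idx, (gap, c) in enumerate(clauses):' building watch lists, the mutable gap
-- copies, and the initially-fired clauses ('watch.setdefault(x, []).append(idx)' is
-- exactly insert x (getD x [] ++ [idx]))
def pvBuild : List (PySem.Set Char × Char) → Nat → PySem.Dict Char (List Nat) →
    List (PySem.Set Char) → PySem.Set Char → List Char →
    PySem.Dict Char (List Nat) × List (PySem.Set Char) × PySem.Set Char × List Char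
  | [], _, w, gs, r, q => (w, gs, r, q)
  | (gap, c) :: rest, idx, w, gs, r, q =>
    let gs' := gs ++ [gap]
    let w' := gap.foldl (fun d x => d.insert x (d.getD x [] ++ [idx])) w
    if gap = [] ∧ c ∉ r then
      pvBuild rest (idx + 1) w' gs' (PySem.Set.add r c) (q ++ [c])
    else
      pvBuild rest (idx + 1) w' gs' r q

-- body of 'for idx in watch.get(x, []):' — discard x from gaps[idx], fire the clause
-- when its gap becomes empty (clauses[idx] is always in range in Python; the total
-- getD/getElem? forms are no-ops on the unreachable out-of-range case)
def pvStep (clauses : List (PySem.Set Char × Char)) (x : Char)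
    (st : List (PySem.Set Char) × PySem.Set Char × List Char) (idx : Nat) :
    List (PySem.Set Char) × PySem.Set Char × List Char :=
  let g' := PySem.Set.discard (st.1.getD idx PySem.Set.empty) x
  let gaps' := st.1.set idx g'
  match clauses[idx]? with
  | some p =>
    if g' = [] ∧ p.2 ∉ st.2.1 then (gaps', PySem.Set.add st.2.1 p.2, st.2.2 ++ [p.2])
    else (gaps', st.2.1, st.2.2)
  | none => (gaps', st.2.1, st.2.2)

-- termination measure for the propagation loop: queue length plus twice the number of
-- clause heads not yet removed
def pvFree (clauses : List (PySem.Set Char × Char)) (removed : PySem.Set Char) : Nat :=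
  ((PySem.Set.ofList (clauses.map Prod.snd)).filter
    (fun c => !PySem.Set.contains removed c)).length

-- termination helpers (cited in decreasing_by)
theorem pvFree_add_lt (clauses : List (PySem.Set Char × Char)) (r : PySem.Set Char)
    (c : Char) (hc : c ∈ clauses.map Prod.snd) (hcr : c ∉ r) :
    pvFree clauses (PySem.Set.add r c) < pvFree clauses r := by
  unfold pvFree
  have hmemL : c ∈ PySem.Set.ofList (clauses.map Prod.snd) := by
    rw [PySem.Set.mem_ofList]; exact hc
  have hsplit : (PySem.Set.ofList (clauses.map Prod.snd)).filter
      (fun y => !PySem.Set.contains (PySem.Set.add r c) y)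
      = ((PySem.Set.ofList (clauses.map Prod.snd)).filter
          (fun y => !PySem.Set.contains r y)).filter (fun y => !(y = c : Bool)) := by
    rw [List.filter_filter]
    apply List.filter_congr
    intro y _
    by_cases h1 : y ∈ r <;> by_cases h2 : y = c <;>
      simp [h1, h2, PySem.Set.mem_add, PySem.Set.contains_iff]
  rw [hsplit]
  apply List.length_filter_lt_length_iff_exists.mpr
  refine ⟨c, ?_, by simp⟩
  simp only [List.mem_filter]
  exact ⟨hmemL, by simpa [PySem.Set.contains_iff] using hcr⟩

theorem pvStep_measure (clauses : List (PySem.Set Char × Char)) (x : Char)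
    (st : List (PySem.Set Char) × PySem.Set Char × List Char) (idx : Nat) :
    (pvStep clauses x st idx).2.2.length + 2 * pvFree clauses (pvStep clauses x st idx).2.1
      ≤ st.2.2.length + 2 * pvFree clauses st.2.1 := by
  unfold pvStep
  cases hcl : clauses[idx]? with
  | none => simp
  | some p =>
    simp only
    split_ifs with hfire
    · have hlt : pvFree clauses (PySem.Set.add st.2.1 p.2) < pvFree clauses st.2.1 := by
        apply pvFree_add_lt _ _ _ _ hfire.2
        exact List.mem_map_of_mem (List.mem_of_getElem? hcl)
      simp only [List.length_append, List.length_singleton]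
      omega
    · simp

theorem pvFold_measure (clauses : List (PySem.Set Char × Char)) (x : Char) :
    ∀ (L : List Nat) (st : List (PySem.Set Char) × PySem.Set Char × List Char),
    (L.foldl (pvStep clauses x) st).2.2.length
        + 2 * pvFree clauses (L.foldl (pvStep clauses x) st).2.1
      ≤ st.2.2.length + 2 * pvFree clauses st.2.1 := by
  intro L
  induction L with
  | nil => intro st; simp
  | cons i L ih =>
    intro st
    calc ((i :: L).foldl (pvStep clauses x) st).2.2.length
          + 2 * pvFree clauses ((i :: L).foldl (pvStep clauses x) st).2.1
        = ((L.foldl (pvStep clauses x) (pvStep clauses x st i))).2.2.length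
          + 2 * pvFree clauses ((L.foldl (pvStep clauses x) (pvStep clauses x st i))).2.1 := rfl
      _ ≤ (pvStep clauses x st i).2.2.length + 2 * pvFree clauses (pvStep clauses x st i).2.1 := ih _
      _ ≤ st.2.2.length + 2 * pvFree clauses st.2.1 := pvStep_measure clauses x st i

-- 'while queue: x = queue.pop(); for idx in watch.get(x, []): …'
def pvProp (clauses : List (PySem.Set Char × Char)) (watch : PySem.Dict Char (List Nat))
    (gaps : List (PySem.Set Char)) (removed : PySem.Set Char) (queue : List Char) :
    PySem.Set Char :=
  if h : queue = [] then removed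
  else
    let x := queue.getLast h
    let st := (watch.getD x []).foldl (pvStep clauses x) (gaps, removed, queue.dropLast)
    pvProp clauses watch st.1 st.2.1 st.2.2
termination_by queue.length + 2 * pvFree clauses removed
decreasing_by
  have h1 := pvFold_measure clauses (queue.getLast h) (watch.getD (queue.getLast h) []) (gaps, removed, queue.dropLast)
  have h2 : queue.dropLast.length + 1 = queue.length := by
    have := List.length_pos_of_ne_nil h
    simp [List.length_dropLast]
    omega
  simp only at h1
  omega

def eliminate_consecutive_characters_alt (s : String) : String :=
  let clauses := pvClauses s.toList
  let b := pvBuild clauses 0 PySem.Dict.empty [] PySem.Set.empty []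
  let removed := pvProp clauses b.1 b.2.1 b.2.2.1 b.2.2.2
  String.ofList (s.toList.filter (fun ch => !PySem.Set.contains removed ch))

-- ===== PRECONDITION & SPEC =====
def Spec_eliminate_consecutive_characters (s : String) (out : String) : Prop := out = eliminate_consecutive_characters_alt s
instance (s : String) (out : String) : Decidable (Spec_eliminate_consecutive_characters s out) := by unfold Spec_eliminate_consecutive_characters; infer_instance

-- ===== CLAIM (what is proved, stated in full; the proofs are below) =====
def Claim_equal_eliminate_consecutive_characters : Prop := ∀ (s : String), Dom_eliminate_consecutive_characters s → Spec_eliminate_consecutive_characters s (eliminate_consecutive_characters s)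

-- ===== LEMMAS AND PROOFS =====

-- ========== reference fixpoint (proof-side only): grow a removed set by scanning the
-- ========== original list, used to characterise A's rewrite loop ==========
def pvRefPass (removed : PySem.Set Char) (prev : Option Char) (new : PySem.Set Char) :
    List Char → PySem.Set Char
  | [] => new
  | c :: rest =>
    if PySem.Set.contains removed c then pvRefPass removed prev new rest
    else pvRefPass removed (some c) (if some c = prev then PySem.Set.add new c else new) rest

theorem pvRefPass_mem {x : Char} : ∀ (l : List Char) (removed : PySem.Set Char)
    (prev : Option Char) (new : PySem.Set Char),
    x ∈ pvRefPass removed prev new l → x ∈ new ∨ (x ∈ l ∧ x ∉ removed) := by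
  intro l
  induction l with
  | nil => intro removed prev new h; exact Or.inl h
  | cons c rest ih =>
    intro removed prev new h
    by_cases hr : PySem.Set.contains removed c
    · simp only [pvRefPass, hr, if_pos] at h
      rcases ih _ _ _ h with h' | h'
      · exact Or.inl h'
      · exact Or.inr ⟨List.mem_cons_of_mem _ h'.1, h'.2⟩
    · simp only [pvRefPass, hr, Bool.false_eq_true, if_false] at h
      rcases ih _ _ _ h with h' | h'
      · by_cases hc : some c = prev
        · rw [if_pos hc, PySem.Set.mem_add] at h'
          rcases h' with h' | h'
          · exact Or.inl h'
          · subst h'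
            exact Or.inr ⟨List.mem_cons_self, by simpa [PySem.Set.contains_iff] using hr⟩
        · rw [if_neg hc] at h'
          exact Or.inl h'
      · exact Or.inr ⟨List.mem_cons_of_mem _ h'.1, h'.2⟩

def pvRefLoop (l : List Char) (removed : PySem.Set Char) : PySem.Set Char :=
  let new := pvRefPass removed none PySem.Set.empty l
  if h : new = [] then removed else pvRefLoop l (PySem.Set.union removed new)
termination_by (l.filter (fun x => !PySem.Set.contains removed x)).length
decreasing_by
  have hc : new.head h ∈ pvRefPass removed none PySem.Set.empty l := List.head_mem h
  rcases pvRefPass_mem l removed none PySem.Set.empty hc with h' | h'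
  · cases h'
  · obtain ⟨hcl, hcr⟩ := h'
    have heq : l.filter (fun x => !PySem.Set.contains (PySem.Set.union removed new) x)
        = (l.filter (fun x => !PySem.Set.contains removed x)).filter
            (fun x => !decide (x ∈ new)) := by
      rw [List.filter_filter]
      apply List.filter_congr
      intro x _
      by_cases h1 : x ∈ removed <;> by_cases h2 : x ∈ new <;>
        simp [h1, h2, PySem.Set.mem_union]
    rw [heq]
    apply List.length_filter_lt_length_iff_exists.mpr
    refine ⟨new.head h, ?_, by simp [List.head_mem h]⟩
    simp only [List.mem_filter]
    exact ⟨hcl, by simpa [PySem.Set.contains_iff] using hcr⟩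

-- the sequential single-character replaces are one filter over the eliminate list
theorem pvRemoveA_eq_filter : ∀ (e l : List Char),
    pvRemoveA l e = l.filter (fun c => !e.contains c) := by
  intro e
  induction e with
  | nil => intro l; simp [pvRemoveA]
  | cons j rest ih =>
    intro l
    calc pvRemoveA l (j :: rest)
        = pvRemoveA (l.filter (fun c => c ≠ j)) rest := rfl
      _ = (l.filter (fun c => c ≠ j)).filter (fun c => !rest.contains c) := ih _
      _ = l.filter (fun c => !(j :: rest).contains c) := by
          rw [List.filter_filter]
          apply List.filter_congr
          intro x _
          by_cases h1 : x = j <;> by_cases h2 : x ∈ rest <;>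
            simp [h1, h2, List.contains_eq_mem]

-- the reference pass over the original string (skipping removed) collects exactly the
-- characters of A's pass over the filtered string
theorem pv_pass_corr (R : PySem.Set Char) : ∀ (l : List Char) (prev : Option Char)
    (acc : List Char) (new : PySem.Set Char), (∀ x, x ∈ new ↔ x ∈ acc) →
    ∀ x, x ∈ pvRefPass R prev new l ↔
      x ∈ pvPassA prev acc (l.filter (fun c => !PySem.Set.contains R c)) := by
  intro l
  induction l with
  | nil => intro prev acc new hinv x; simpa [pvRefPass, pvPassA] using hinv x
  | cons c rest ih =>
    intro prev acc new hinv x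
    by_cases hr : PySem.Set.contains R c
    · rw [List.filter_cons_of_neg (by simpa using hr)]
      simp only [pvRefPass, hr, if_pos]
      exact ih prev acc new hinv x
    · rw [List.filter_cons_of_pos (by simpa using hr)]
      simp only [pvRefPass, hr, Bool.false_eq_true, if_false]
      apply ih
      intro y
      by_cases hc : some c = prev
      · simp [hc, PySem.Set.mem_add, hinv y, or_comm]
      · simp [hc, hinv y]

-- one-step unfoldings of the two loops
theorem pvLoopA_eq (l : List Char) : pvLoopA l =
    if pvPassA none [] l = [] then l else pvLoopA (pvRemoveA l (pvPassA none [] l)) := by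
  rw [pvLoopA]; split <;> rfl

theorem pvRefLoop_eq (l : List Char) (R : PySem.Set Char) : pvRefLoop l R =
    if pvRefPass R none PySem.Set.empty l = [] then R
    else pvRefLoop l (PySem.Set.union R (pvRefPass R none PySem.Set.empty l)) := by
  rw [pvRefLoop]; split <;> rfl

-- the next A-state after one removal round is the filter of l by the grown removed set,
-- and it is strictly shorter
theorem pv_step_filter (l : List Char) (R : PySem.Set Char)
    (hpb : pvRefPass R none PySem.Set.empty l ≠ []) :
    pvRemoveA (l.filter (fun c => !PySem.Set.contains R c))
        (pvPassA none [] (l.filter (fun c => !PySem.Set.contains R c)))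
      = l.filter (fun c => !PySem.Set.contains
          (PySem.Set.union R (pvRefPass R none PySem.Set.empty l)) c) := by
  set m := l.filter (fun c => !PySem.Set.contains R c) with hm
  set pb := pvRefPass R none PySem.Set.empty l with hpbdef
  set e := pvPassA none [] m with hedef
  have hcorr : ∀ x, x ∈ pb ↔ x ∈ e :=
    pv_pass_corr R l none [] PySem.Set.empty (by simp [PySem.Set.empty])
  rw [pvRemoveA_eq_filter, hm, List.filter_filter]
  apply List.filter_congr
  intro x _
  by_cases h1 : x ∈ R <;> by_cases h2 : x ∈ e <;>
    simp [h1, h2, PySem.Set.mem_union, List.contains_eq_mem, hcorr x]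

theorem pv_filter_union_lt (l : List Char) (R : PySem.Set Char)
    (hpb : pvRefPass R none PySem.Set.empty l ≠ []) :
    (l.filter (fun c => !PySem.Set.contains
        (PySem.Set.union R (pvRefPass R none PySem.Set.empty l)) c)).length
      < (l.filter (fun c => !PySem.Set.contains R c)).length := by
  set m := l.filter (fun c => !PySem.Set.contains R c) with hm
  set e := pvPassA none [] m with hedef
  have hcorr : ∀ x, x ∈ pvRefPass R none PySem.Set.empty l ↔ x ∈ e :=
    pv_pass_corr R l none [] PySem.Set.empty (by simp [PySem.Set.empty])
  have he : e ≠ [] := by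
    intro h0
    apply hpb
    rw [List.eq_nil_iff_forall_not_mem]
    intro x hx
    have := (hcorr x).mp hx
    rw [h0] at this
    cases this
  have hjm : e.head he ∈ m := by
    rcases pvPassA_mem m none [] (List.head_mem he) with h' | h'
    · cases h'
    · exact h'
  rw [← pv_step_filter l R hpb, ← hm, ← hedef]
  exact pvRemoveA_length_lt he hjm

-- the main fixpoint correspondence: A iterating on the filtered string equals the
-- reference loop growing the removed set against the original string
theorem pv_main : ∀ (n : Nat) (l : List Char) (R : PySem.Set Char),
    (l.filter (fun c => !PySem.Set.contains R c)).length ≤ n →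
    pvLoopA (l.filter (fun c => !PySem.Set.contains R c))
      = l.filter (fun c => !PySem.Set.contains (pvRefLoop l R) c) := by
  intro n
  induction n with
  | zero =>
    intro l R hn
    have hm : l.filter (fun c => !PySem.Set.contains R c) = [] :=
      List.eq_nil_of_length_eq_zero (Nat.le_zero.mp hn)
    have hpb : pvRefPass R none PySem.Set.empty l = [] := by
      rw [List.eq_nil_iff_forall_not_mem]
      intro x hx
      have := (pv_pass_corr R l none [] PySem.Set.empty (by simp [PySem.Set.empty]) x).mp hx
      rw [hm] at this
      cases this
    have he : pvPassA none [] (l.filter (fun c => !PySem.Set.contains R c)) = [] := by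
      rw [hm]; rfl
    rw [pvLoopA_eq, pvRefLoop_eq, if_pos he, if_pos hpb]
  | succ n ih =>
    intro l R hn
    by_cases hpb : pvRefPass R none PySem.Set.empty l = []
    · have he : pvPassA none [] (l.filter (fun c => !PySem.Set.contains R c)) = [] := by
        rw [List.eq_nil_iff_forall_not_mem]
        intro x hx
        have := (pv_pass_corr R l none [] PySem.Set.empty (by simp [PySem.Set.empty]) x).mpr hx
        rw [hpb] at this
        cases this
      rw [pvLoopA_eq, pvRefLoop_eq, if_pos he, if_pos hpb]
    · have he : pvPassA none [] (l.filter (fun c => !PySem.Set.contains R c)) ≠ [] := by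
        intro h0
        apply hpb
        rw [List.eq_nil_iff_forall_not_mem]
        intro x hx
        have := (pv_pass_corr R l none [] PySem.Set.empty (by simp [PySem.Set.empty]) x).mp hx
        rw [h0] at this
        cases this
      have hlt := pv_filter_union_lt l R hpb
      rw [pvLoopA_eq, pvRefLoop_eq, if_neg he, if_neg hpb, pv_step_filter l R hpb]
      exact ih l (PySem.Set.union R (pvRefPass R none PySem.Set.empty l)) (by omega)

-- ========== Horn-clause characterisation shared by both programs ==========

-- clause closedness: every extracted clause whose gap set lies in C forces its head into C
def pvCClosed (l : List Char) (C : List Char) : Prop :=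
  ∀ p ∈ pvClauses l, (∀ x ∈ p.1, x ∈ C) → p.2 ∈ C

-- membership in A's duplicate pass is exactly an adjacent equal pair
theorem pvPassA_iff : ∀ (m : List Char) (prev : Option Char) (acc : List Char) (x : Char),
    x ∈ pvPassA prev acc m ↔
      x ∈ acc ∨ (∃ u v, m = u ++ x :: x :: v) ∨ (prev = some x ∧ ∃ v, m = x :: v) := by
  intro m
  induction m with
  | nil => intro prev acc x; simp [pvPassA]
  | cons i r ih =>
    intro prev acc x
    rw [pvPassA, ih]
    constructor
    · rintro (h | h | h)
      · by_cases hc : some i = prev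
        · rw [if_pos hc] at h
          rcases List.mem_append.mp h with h | h
          · exact Or.inl h
          · simp only [List.mem_singleton] at h
            subst h
            exact Or.inr (Or.inr ⟨hc.symm, r, rfl⟩)
        · rw [if_neg hc] at h
          exact Or.inl h
      · obtain ⟨u, v, huv⟩ := h
        exact Or.inr (Or.inl ⟨i :: u, v, by rw [huv]; rfl⟩)
      · obtain ⟨hi, v, hv⟩ := h
        have hix : i = x := by injection hi
        exact Or.inr (Or.inl ⟨[], v, by rw [hv, hix]; rfl⟩)
    · rintro (h | h | h)
      · left
        by_cases hc : some i = prev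
        · rw [if_pos hc]; exact List.mem_append_left _ h
        · rw [if_neg hc]; exact h
      · obtain ⟨u, v, huv⟩ := h
        cases u with
        | nil =>
          simp only [List.nil_append, List.cons.injEq] at huv
          exact Or.inr (Or.inr ⟨by rw [huv.1], v, huv.2⟩)
        | cons a u' =>
          simp only [List.cons_append, List.cons.injEq] at huv
          exact Or.inr (Or.inl ⟨u', v, huv.2⟩)
      · obtain ⟨hp, v, hv⟩ := h
        simp only [List.cons.injEq] at hv
        left
        rw [if_pos (by rw [hv.1, hp])]
        exact List.mem_append_right _ (by rw [hv.1]; exact List.mem_singleton_self x)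

-- decomposition of a successful gap scan: the scanned prefix up to the next occurrence
theorem pvGapOf_some : ∀ (r : List Char) (c : Char) (g0 g : PySem.Set Char),
    pvGapOf c r g0 = some g →
      ∃ w v, r = w ++ c :: v ∧ c ∉ w ∧ (∀ x, x ∈ g ↔ x ∈ g0 ∨ x ∈ w) := by
  intro r
  induction r with
  | nil => intro c g0 g h; simp [pvGapOf] at h
  | cons a r ih =>
    intro c g0 g h
    rw [pvGapOf] at h
    by_cases hac : a = c
    · rw [if_pos hac] at h
      injection h with h
      exact ⟨[], r, by simp [hac], by simp, by simp [← h]⟩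
    · rw [if_neg hac] at h
      obtain ⟨w, v, hr, hcw, hg⟩ := ih c _ g h
      refine ⟨a :: w, v, by rw [List.cons_append, hr], ?_, ?_⟩
      · simp only [List.mem_cons, not_or]
        exact ⟨fun hca => hac hca.symm, hcw⟩
      · intro x
        rw [hg x, PySem.Set.mem_add]
        simp only [List.mem_cons]
        tauto

-- a gap scan on w ++ c :: v succeeds, collecting only elements of g0 and w
theorem pvGapOf_exists : ∀ (w : List Char) (c : Char) (v : List Char) (g0 : PySem.Set Char),
    ∃ g, pvGapOf c (w ++ c :: v) g0 = some g ∧ ∀ x ∈ g, x ∈ g0 ∨ x ∈ w := by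
  intro w
  induction w with
  | nil => intro c v g0; exact ⟨g0, by simp [pvGapOf], fun x hx => Or.inl hx⟩
  | cons a w ih =>
    intro c v g0
    by_cases hac : a = c
    · exact ⟨g0, by simp [pvGapOf, hac], fun x hx => Or.inl hx⟩
    · obtain ⟨g, hg, hsub⟩ := ih c v (PySem.Set.add g0 a)
      refine ⟨g, by rw [List.cons_append, pvGapOf, if_neg hac]; exact hg, ?_⟩
      intro x hx
      rcases hsub x hx with h | h
      · rw [PySem.Set.mem_add] at h
        rcases h with h | h
        · exact Or.inl h
        · exact Or.inr (by simp [h])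
      · exact Or.inr (List.mem_cons_of_mem _ h)

-- every extracted clause comes from a position and its gap scan
theorem pvClauses_mem : ∀ (l : List Char) (p : PySem.Set Char × Char), p ∈ pvClauses l →
    ∃ u r, l = u ++ p.2 :: r ∧ pvGapOf p.2 r PySem.Set.empty = some p.1 := by
  intro l
  induction l with
  | nil => intro p h; cases h
  | cons c r ih =>
    intro p h
    rw [pvClauses] at h
    rcases List.mem_append.mp h with h | h
    · cases hg : pvGapOf c r PySem.Set.empty with
      | none => rw [hg] at h; cases h
      | some g =>
        rw [hg] at h
        simp only [List.mem_singleton] at h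
        subst h
        exact ⟨[], r, rfl, hg⟩
    · obtain ⟨u, r', hr, hgo⟩ := ih p h
      exact ⟨c :: u, r', by rw [hr]; rfl, hgo⟩

-- conversely, every position whose character reappears yields its clause
theorem pvClauses_of_decomp : ∀ (u : List Char) (c : Char) (r : List Char)
    (g : PySem.Set Char), pvGapOf c r PySem.Set.empty = some g →
    (g, c) ∈ pvClauses (u ++ c :: r) := by
  intro u
  induction u with
  | nil =>
    intro c r g hg
    rw [List.nil_append, pvClauses, hg]
    exact List.mem_append_left _ (List.mem_singleton_self _)
  | cons a u ih =>
    intro c r g hg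
    rw [List.cons_append, pvClauses]
    exact List.mem_append_right _ (ih c r g hg)

-- clause soundness: a fireable clause is a gap pair
theorem pv_clause_sound (l : List Char) (p : PySem.Set Char × Char)
    (hp : p ∈ pvClauses l) (X : List Char) (hX : ∀ x ∈ p.1, x ∈ X) :
    ∃ u w v, l = u ++ p.2 :: (w ++ p.2 :: v) ∧ ∀ x ∈ w, x ∈ X := by
  obtain ⟨u, r, hl, hg⟩ := pvClauses_mem l p hp
  obtain ⟨w, v, hr, _, hmem⟩ := pvGapOf_some r p.2 _ _ hg
  refine ⟨u, w, v, by rw [hl, hr], ?_⟩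
  intro x hx
  exact hX x ((hmem x).mpr (Or.inr hx))

-- clause completeness: a gap pair yields a fireable clause
theorem pv_clause_complete (l u w v : List Char) (c : Char)
    (hl : l = u ++ c :: (w ++ c :: v)) (X : List Char) (hw : ∀ x ∈ w, x ∈ X) :
    ∃ g, (g, c) ∈ pvClauses l ∧ ∀ x ∈ g, x ∈ X := by
  obtain ⟨g, hg, hsub⟩ := pvGapOf_exists w c v PySem.Set.empty
  refine ⟨g, by rw [hl]; exact pvClauses_of_decomp u c _ g hg, ?_⟩
  intro x hx
  rcases hsub x hx with h | h
  · cases h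
  · exact hw x h

-- a gap pair with gap inside R and head outside R shows up as an adjacent pair in the
-- R-filtered list
theorem pv_decomp_adj (u w v : List Char) (c : Char) (R : List Char)
    (hw : ∀ x ∈ w, x ∈ R) (hc : c ∉ R) :
    ∃ u' v', (u ++ c :: (w ++ c :: v)).filter (fun y => !PySem.Set.contains R y)
      = u' ++ c :: c :: v' := by
  refine ⟨u.filter (fun y => !PySem.Set.contains R y),
          v.filter (fun y => !PySem.Set.contains R y), ?_⟩
  have hwf : w.filter (fun y => !PySem.Set.contains R y) = [] := by
    rw [List.filter_eq_nil_iff]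
    intro x hx
    simp [PySem.Set.contains_iff, hw x hx]
  have hcf : (!PySem.Set.contains R c) = true := by
    simpa [PySem.Set.contains_iff] using hc
  simp [List.filter_append, List.filter_cons, hcf, hc]
  exact hw

-- an adjacent pair in the filtered list lifts to a gap pair of the original
theorem pv_adj_decomp (p : Char → Bool) (l u' v' : List Char) (c : Char)
    (h : l.filter p = u' ++ c :: c :: v') :
    ∃ u w v, l = u ++ c :: (w ++ c :: v) ∧ ∀ x ∈ w, p x = false := by
  rw [show u' ++ c :: c :: v' = u' ++ (c :: c :: v') from rfl,
      List.filter_eq_append_iff] at h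
  obtain ⟨l₁, l₂, hl, _, h₂⟩ := h
  rw [List.filter_eq_cons_iff] at h₂
  obtain ⟨m₁, m₂, hm, _, _, h₂'⟩ := h₂
  rw [List.filter_eq_cons_iff] at h₂'
  obtain ⟨n₁, n₂, hn, hn₁, _, _⟩ := h₂'
  refine ⟨l₁ ++ m₁, n₁, n₂, ?_, ?_⟩
  · rw [hl, hm, hn]; simp
  · intro x hx
    simpa using hn₁ x hx

-- the reference pass, semantically: its members are exactly the heads of fireable clauses
theorem pv_refpass_clause (l : List Char) (R : PySem.Set Char) (c : Char)
    (hc : c ∈ pvRefPass R none PySem.Set.empty l) :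
    ∃ g, (g, c) ∈ pvClauses l ∧ ∀ x ∈ g, x ∈ R := by
  have h := (pv_pass_corr R l none [] PySem.Set.empty (by simp [PySem.Set.empty]) c).mp hc
  rw [pvPassA_iff] at h
  rcases h with h | h | h
  · cases h
  · obtain ⟨u', v', hf⟩ := h
    obtain ⟨u, w, v, hl, hw⟩ := pv_adj_decomp _ l u' v' c hf
    refine pv_clause_complete l u w v c hl R ?_
    intro x hx
    have := hw x hx
    simpa [PySem.Set.contains_iff] using this
  · exact absurd h.1 (by simp)

-- when the reference pass is empty, the removed set is clause-closed
theorem pv_refpass_empty_closed (l : List Char) (R : PySem.Set Char)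
    (h : pvRefPass R none PySem.Set.empty l = []) : pvCClosed l R := by
  intro p hp hX
  by_cases hcR : p.2 ∈ R
  · exact hcR
  obtain ⟨u, w, v, hl, hw⟩ := pv_clause_sound l p hp R hX
  obtain ⟨u', v', hf⟩ := pv_decomp_adj u w v p.2 R hw hcR
  have hmem : p.2 ∈ pvPassA none [] (l.filter (fun y => !PySem.Set.contains R y)) := by
    rw [pvPassA_iff]
    exact Or.inr (Or.inl ⟨u', v', by rw [hl, hf]⟩)
  have := (pv_pass_corr R l none [] PySem.Set.empty (by simp [PySem.Set.empty]) p.2).mpr hmem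
  rw [h] at this
  cases this

-- the reference loop result is clause-closed …
theorem pvRefLoop_closed : ∀ (n : Nat) (l : List Char) (R : PySem.Set Char),
    (l.filter (fun c => !PySem.Set.contains R c)).length ≤ n →
    pvCClosed l (pvRefLoop l R) := by
  intro n
  induction n with
  | zero =>
    intro l R hn
    have hm : l.filter (fun c => !PySem.Set.contains R c) = [] :=
      List.eq_nil_of_length_eq_zero (Nat.le_zero.mp hn)
    have hpb : pvRefPass R none PySem.Set.empty l = [] := by
      rw [List.eq_nil_iff_forall_not_mem]
      intro x hx
      have := (pv_pass_corr R l none [] PySem.Set.empty (by simp [PySem.Set.empty]) x).mp hx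
      rw [hm] at this
      cases this
    rw [pvRefLoop_eq, if_pos hpb]
    exact pv_refpass_empty_closed l R hpb
  | succ n ih =>
    intro l R hn
    by_cases hpb : pvRefPass R none PySem.Set.empty l = []
    · rw [pvRefLoop_eq, if_pos hpb]
      exact pv_refpass_empty_closed l R hpb
    · rw [pvRefLoop_eq, if_neg hpb]
      have hlt := pv_filter_union_lt l R hpb
      exact ih l _ (by omega)

-- … and is contained in every clause-closed set
theorem pvRefLoop_min : ∀ (n : Nat) (l : List Char) (R : PySem.Set Char)
    (C : List Char), (l.filter (fun c => !PySem.Set.contains R c)).length ≤ n →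
    pvCClosed l C → (∀ x ∈ R, x ∈ C) → ∀ x ∈ pvRefLoop l R, x ∈ C := by
  intro n
  induction n with
  | zero =>
    intro l R C hn hC hRC
    have hm : l.filter (fun c => !PySem.Set.contains R c) = [] :=
      List.eq_nil_of_length_eq_zero (Nat.le_zero.mp hn)
    have hpb : pvRefPass R none PySem.Set.empty l = [] := by
      rw [List.eq_nil_iff_forall_not_mem]
      intro x hx
      have := (pv_pass_corr R l none [] PySem.Set.empty (by simp [PySem.Set.empty]) x).mp hx
      rw [hm] at this
      cases this
    rw [pvRefLoop_eq, if_pos hpb]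
    exact hRC
  | succ n ih =>
    intro l R C hn hC hRC
    by_cases hpb : pvRefPass R none PySem.Set.empty l = []
    · rw [pvRefLoop_eq, if_pos hpb]; exact hRC
    · rw [pvRefLoop_eq, if_neg hpb]
      have hlt := pv_filter_union_lt l R hpb
      refine ih l _ C (by omega) hC ?_
      intro x hx
      rw [PySem.Set.mem_union] at hx
      rcases hx with hx | hx
      · exact hRC x hx
      · obtain ⟨g, hgcl, hgR⟩ := pv_refpass_clause l R x hx
        exact hC (g, x) hgcl (fun y hy => hRC y (hgR y hy))

-- ========== invariants of B's unit propagation ==========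

theorem pv_getD_set_self (l : List (PySem.Set Char)) (i : Nat) (a : PySem.Set Char)
    (h : i < l.length) : (l.set i a).getD i PySem.Set.empty = a := by
  rw [List.getD_eq_getElem?_getD, List.getElem?_set_self h]; rfl

theorem pv_getD_set_ne (l : List (PySem.Set Char)) (i j : Nat) (a : PySem.Set Char)
    (h : i ≠ j) : (l.set i a).getD j PySem.Set.empty = l.getD j PySem.Set.empty := by
  rw [List.getD_eq_getElem?_getD, List.getElem?_set, if_neg h, ← List.getD_eq_getElem?_getD]

-- the watch-building fold only ever appends to watch lists …
theorem pvWatch_fold_mono : ∀ (gap : List Char) (w : PySem.Dict Char (List Nat))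
    (idx : Nat) (y : Char) (i : Nat), i ∈ w.getD y [] →
    i ∈ (gap.foldl (fun d x => d.insert x (d.getD x [] ++ [idx])) w).getD y [] := by
  intro gap
  induction gap with
  | nil => intro w idx y i h; exact h
  | cons a gap ih =>
    intro w idx y i h
    apply ih
    rw [PySem.Dict.getD_insert]
    split_ifs with hy
    · subst hy; exact List.mem_append_left _ h
    · exact h

-- … and registers the clause index under every character of its gap
theorem pvWatch_fold_self : ∀ (gap : List Char) (w : PySem.Dict Char (List Nat))
    (idx : Nat) (x : Char), x ∈ gap →
    idx ∈ (gap.foldl (fun d x => d.insert x (d.getD x [] ++ [idx])) w).getD x [] := by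
  intro gap
  induction gap with
  | nil => intro w idx x h; cases h
  | cons a gap ih =>
    intro w idx x h
    rcases List.mem_cons.mp h with h | h
    · subst h
      have hm : idx ∈ (w.insert x (w.getD x [] ++ [idx])).getD x [] := by
        rw [PySem.Dict.getD_insert, if_pos rfl]
        exact List.mem_append_right _ (List.mem_singleton_self _)
      exact pvWatch_fold_mono gap _ idx x idx hm
    · exact ih _ idx x h

-- the propagation invariant: gap copies stay inside the original gaps, emptied clauses
-- have fired, non-membership in a gap copy certifies removal, the queue is a nodup
-- sub-collection of removed
def pvInvB (cl : List (PySem.Set Char × Char))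
    (st : List (PySem.Set Char) × PySem.Set Char × List Char) : Prop :=
  st.1.length = cl.length ∧
  (∀ idx p, cl[idx]? = some p → ∀ y ∈ st.1.getD idx PySem.Set.empty, y ∈ p.1) ∧
  (∀ idx p, cl[idx]? = some p → st.1.getD idx PySem.Set.empty = [] → p.2 ∈ st.2.1) ∧
  (∀ idx p, cl[idx]? = some p → ∀ y ∈ p.1, y ∉ st.1.getD idx PySem.Set.empty → y ∈ st.2.1) ∧
  (∀ y ∈ st.2.2, y ∈ st.2.1) ∧
  st.2.2.Nodup

-- characters both in a live gap copy and removed are still pending: in the queue, or the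
-- currently popped x with the clause index still to be visited in L
def pvJ2 (st : List (PySem.Set Char) × PySem.Set Char × List Char) (x : Char)
    (L : List Nat) : Prop :=
  ∀ idx y, y ∈ st.1.getD idx PySem.Set.empty → y ∈ st.2.1 →
    y ∈ st.2.2 ∨ (y = x ∧ idx ∈ L)

theorem pvStep_inv (cl : List (PySem.Set Char × Char)) (C : List Char)
    (hCl : ∀ p ∈ cl, (∀ x ∈ p.1, x ∈ C) → p.2 ∈ C) (x : Char)
    (st : List (PySem.Set Char) × PySem.Set Char × List Char) (idx0 : Nat) (L : List Nat)
    (hx : x ∈ st.2.1) (hqx : x ∉ st.2.2) (hInv : pvInvB cl st)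
    (hK : ∀ y ∈ st.2.1, y ∈ C) (hJ2 : pvJ2 st x (idx0 :: L)) :
    x ∈ (pvStep cl x st idx0).2.1 ∧ x ∉ (pvStep cl x st idx0).2.2 ∧
    pvInvB cl (pvStep cl x st idx0) ∧ (∀ y ∈ (pvStep cl x st idx0).2.1, y ∈ C) ∧
    pvJ2 (pvStep cl x st idx0) x L := by
  obtain ⟨hlen, hJ1, hJ3, hJ5, hJ6, hJ7⟩ := hInv
  unfold pvStep
  cases hcl : cl[idx0]? with
  | none =>
    -- idx0 out of range: the set is a no-op and nothing fires
    have hge : cl.length ≤ idx0 := by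
      by_contra hlt
      rw [List.getElem?_eq_getElem (by omega)] at hcl
      cases hcl
    have hset : st.1.set idx0 (PySem.Set.discard (st.1.getD idx0 PySem.Set.empty) x)
        = st.1 := List.set_eq_of_length_le (by omega)
    simp only [hset]
    refine ⟨hx, hqx, ⟨hlen, hJ1, hJ3, hJ5, hJ6, hJ7⟩, hK, ?_⟩
    intro idx y hy hr
    rcases hJ2 idx y hy hr with h | ⟨hyx, hidx⟩
    · exact Or.inl h
    · rcases List.mem_cons.mp hidx with h | h
      · -- idx = idx0 is impossible: its gap copy defaults to the empty set
        subst h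
        have : st.1.getD idx PySem.Set.empty = PySem.Set.empty :=
          List.getD_eq_default _ _ (by omega)
        rw [this] at hy
        cases hy
      · exact Or.inr ⟨hyx, h⟩
  | some p =>
    have hlt : idx0 < cl.length := (List.getElem?_eq_some_iff.mp hcl).1
    have hlt' : idx0 < st.1.length := by omega
    set g := st.1.getD idx0 PySem.Set.empty with hg
    set g' := PySem.Set.discard g x with hg'
    have hga : ∀ idx, (st.1.set idx0 g').getD idx PySem.Set.empty
        = if idx = idx0 then g' else st.1.getD idx PySem.Set.empty := by
      intro idx
      split_ifs with h
      · subst h; exact pv_getD_set_self _ _ _ hlt'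
      · exact pv_getD_set_ne _ _ _ _ (fun he => h he.symm)
    have hg'sub : ∀ y, y ∈ g' → y ∈ g ∧ y ≠ x := by
      intro y hy; simpa [hg', PySem.Set.mem_discard] using hy
    have hg'rem : ∀ y ∈ p.1, y ∉ g' → y ∈ st.2.1 := by
      intro y hyp hy
      by_cases hyg : y ∈ g
      · by_cases hyx : y = x
        · subst hyx; exact hx
        · exact absurd (by simp [hg', PySem.Set.mem_discard, hyg, hyx]) hy
      · exact hJ5 idx0 p hcl y hyp hyg
    have hsome : ∀ q : PySem.Set Char × Char, cl[idx0]? = some q → q = p := by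
      intro q hq
      rw [hcl] at hq
      exact (Option.some.inj hq).symm
    simp only
    split_ifs with hfire
    · obtain ⟨hge, hnr⟩ := hfire
      have hpC : p.2 ∈ C := by
        apply hCl p (List.mem_of_getElem? hcl)
        intro y hy
        exact hK y (hg'rem y hy (by rw [hge]; intro h; cases h))
      have hxne : x ≠ p.2 := fun h => hnr (h ▸ hx)
      refine ⟨?_, ?_, ⟨?_, ?_, ?_, ?_, ?_, ?_⟩, ?_, ?_⟩
      · rw [PySem.Set.mem_add]; exact Or.inl hx
      · intro h
        rcases List.mem_append.mp h with h | h
        · exact hqx h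
        · simp only [List.mem_singleton] at h; exact hxne h
      · simpa using hlen
      · intro idx q hq y hy
        rw [hga] at hy
        split_ifs at hy with h
        · have hqp := hsome q (h ▸ hq)
          subst hqp
          exact hJ1 idx0 q hcl y (hg'sub y hy).1
        · exact hJ1 idx q hq y hy
      · intro idx q hq he
        rw [hga] at he
        rw [PySem.Set.mem_add]
        split_ifs at he with h
        · have hqp := hsome q (h ▸ hq)
          subst hqp
          exact Or.inr rfl
        · exact Or.inl (hJ3 idx q hq he)
      · intro idx q hq y hy hng
        rw [hga] at hng
        rw [PySem.Set.mem_add]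
        split_ifs at hng with h
        · have hqp := hsome q (h ▸ hq)
          subst hqp
          exact Or.inl (hg'rem y hy hng)
        · exact Or.inl (hJ5 idx q hq y hy hng)
      · intro y hy
        rw [PySem.Set.mem_add]
        rcases List.mem_append.mp hy with h | h
        · exact Or.inl (hJ6 y h)
        · simp only [List.mem_singleton] at h; exact Or.inr h
      · rw [List.nodup_append]
        refine ⟨hJ7, List.nodup_singleton _, ?_⟩
        intro y hy b hb
        rw [List.mem_singleton] at hb
        subst hb
        intro hyb
        subst hyb
        exact hnr (hJ6 _ hy)
      · intro y hy
        rw [PySem.Set.mem_add] at hy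
        rcases hy with hy | hy
        · exact hK y hy
        · subst hy; exact hpC
      · intro idx y hy hr
        rw [hga] at hy
        rw [PySem.Set.mem_add] at hr
        rcases hr with hr | hr
        · split_ifs at hy with h
          · have := (hg'sub y hy)
            rcases hJ2 idx0 y this.1 hr with h' | ⟨hyx, _⟩
            · exact Or.inl (List.mem_append_left _ h')
            · exact absurd hyx this.2
          · rcases hJ2 idx y hy hr with h' | ⟨hyx, hidx⟩
            · exact Or.inl (List.mem_append_left _ h')
            · rcases List.mem_cons.mp hidx with h'' | h''
              · exact absurd h'' h
              · exact Or.inr ⟨hyx, h''⟩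
        · subst hr
          exact Or.inl (List.mem_append_right _ (List.mem_singleton_self _))
    · refine ⟨hx, hqx, ⟨?_, ?_, ?_, ?_, hJ6, hJ7⟩, hK, ?_⟩
      · simpa using hlen
      · intro idx q hq y hy
        rw [hga] at hy
        split_ifs at hy with h
        · have hqp := hsome q (h ▸ hq)
          subst hqp
          exact hJ1 idx0 q hcl y (hg'sub y hy).1
        · exact hJ1 idx q hq y hy
      · intro idx q hq he
        rw [hga] at he
        split_ifs at he with h
        · have hqp := hsome q (h ▸ hq)
          subst hqp
          -- the clause gap emptied but did not fire: its head was already removed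
          rcases not_and_or.mp hfire with h' | h'
          · exact absurd he h'
          · exact not_not.mp h'
        · exact hJ3 idx q hq he
      · intro idx q hq y hy hng
        rw [hga] at hng
        split_ifs at hng with h
        · have hqp := hsome q (h ▸ hq)
          subst hqp
          exact hg'rem y hy hng
        · exact hJ5 idx q hq y hy hng
      · intro idx y hy hr
        rw [hga] at hy
        split_ifs at hy with h
        · have := hg'sub y hy
          rcases hJ2 idx0 y this.1 hr with h' | ⟨hyx, _⟩
          · exact Or.inl h'
          · exact absurd hyx this.2
        · rcases hJ2 idx y hy hr with h' | ⟨hyx, hidx⟩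
          · exact Or.inl h'
          · rcases List.mem_cons.mp hidx with h'' | h''
            · exact absurd h'' h
            · exact Or.inr ⟨hyx, h''⟩

theorem pvFold_inv (cl : List (PySem.Set Char × Char)) (C : List Char)
    (hCl : ∀ p ∈ cl, (∀ x ∈ p.1, x ∈ C) → p.2 ∈ C) (x : Char) :
    ∀ (L : List Nat) (st : List (PySem.Set Char) × PySem.Set Char × List Char),
    x ∈ st.2.1 → x ∉ st.2.2 → pvInvB cl st → (∀ y ∈ st.2.1, y ∈ C) → pvJ2 st x L →
    x ∈ (L.foldl (pvStep cl x) st).2.1 ∧ x ∉ (L.foldl (pvStep cl x) st).2.2 ∧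
    pvInvB cl (L.foldl (pvStep cl x) st) ∧ (∀ y ∈ (L.foldl (pvStep cl x) st).2.1, y ∈ C) ∧
    pvJ2 (L.foldl (pvStep cl x) st) x [] := by
  intro L
  induction L with
  | nil => intro st hx hqx hInv hK hJ2; exact ⟨hx, hqx, hInv, hK, hJ2⟩
  | cons i L ih =>
    intro st hx hqx hInv hK hJ2
    obtain ⟨h1, h2, h3, h4, h5⟩ := pvStep_inv cl C hCl x st i L hx hqx hInv hK hJ2
    simpa only [List.foldl_cons] using ih (pvStep cl x st i) h1 h2 h3 h4 h5

theorem pvProp_eq (cl : List (PySem.Set Char × Char)) (w : PySem.Dict Char (List Nat))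
    (gaps : List (PySem.Set Char)) (removed : PySem.Set Char) (queue : List Char) :
    pvProp cl w gaps removed queue =
      if h : queue = [] then removed
      else
        pvProp cl w
          ((w.getD (queue.getLast h) []).foldl (pvStep cl (queue.getLast h))
            (gaps, removed, queue.dropLast)).1
          ((w.getD (queue.getLast h) []).foldl (pvStep cl (queue.getLast h))
            (gaps, removed, queue.dropLast)).2.1
          ((w.getD (queue.getLast h) []).foldl (pvStep cl (queue.getLast h))
            (gaps, removed, queue.dropLast)).2.2 := by
  rw [pvProp]

theorem pvProp_inv (cl : List (PySem.Set Char × Char)) (w : PySem.Dict Char (List Nat))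
    (C : List Char) (hCl : ∀ p ∈ cl, (∀ x ∈ p.1, x ∈ C) → p.2 ∈ C)
    (hW : ∀ idx p, cl[idx]? = some p → ∀ x ∈ p.1, idx ∈ w.getD x []) :
    ∀ (n : Nat) (gaps : List (PySem.Set Char)) (removed : PySem.Set Char)
      (queue : List Char),
    queue.length + 2 * pvFree cl removed ≤ n →
    pvInvB cl (gaps, removed, queue) → (∀ y ∈ removed, y ∈ C) →
    (∀ idx y, y ∈ gaps.getD idx PySem.Set.empty → y ∈ removed → y ∈ queue) →
    (∀ y ∈ pvProp cl w gaps removed queue, y ∈ C) ∧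
    (∀ p ∈ cl, (∀ y ∈ p.1, y ∈ pvProp cl w gaps removed queue) →
      p.2 ∈ pvProp cl w gaps removed queue) := by
  intro n
  induction n using Nat.strong_induction_on with
  | _ n ih =>
    intro gaps removed queue hn hInv hK hJ2
    rw [pvProp_eq]
    split_ifs with hq
    · constructor
      · exact hK
      · intro p hp hsub
        obtain ⟨idx, hidx⟩ := List.mem_iff_getElem?.mp hp
        have hempty : gaps.getD idx PySem.Set.empty = [] := by
          cases hne : gaps.getD idx PySem.Set.empty with
          | nil => rfl
          | cons y ys =>
            exfalso
            have hy : y ∈ gaps.getD idx PySem.Set.empty := by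
              rw [hne]; exact List.mem_cons_self
            have hyr : y ∈ removed :=
              hsub y (hInv.2.1 idx p hidx y hy)
            have := hJ2 idx y hy hyr
            rw [hq] at this
            cases this
        exact hInv.2.2.1 idx p hidx hempty
    · have hx : queue.getLast hq ∈ removed :=
        hInv.2.2.2.2.1 _ (List.getLast_mem hq)
      have hqsplit : queue.dropLast ++ [queue.getLast hq] = queue :=
        List.dropLast_append_getLast hq
      have hnd : queue.Nodup := hInv.2.2.2.2.2
      have hqx : queue.getLast hq ∉ queue.dropLast := by
        intro hmem
        have hnd' : (queue.dropLast ++ [queue.getLast hq]).Nodup := by rw [hqsplit]; exact hnd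
        rw [List.nodup_append] at hnd'
        exact hnd'.2.2 _ hmem _ (List.mem_singleton_self _) rfl
      have hInv0 : pvInvB cl (gaps, removed, queue.dropLast) := by
        obtain ⟨a1, a2, a3, a4, a5, a6⟩ := hInv
        refine ⟨a1, a2, a3, a4, ?_, ?_⟩
        · intro y hy
          exact a5 y ((List.dropLast_sublist queue).subset hy)
        · exact hnd.sublist (List.dropLast_sublist queue)
      have hJ2L : pvJ2 (gaps, removed, queue.dropLast) (queue.getLast hq)
          (w.getD (queue.getLast hq) []) := by
        intro idx y hy hr
        have hyq : y ∈ queue := hJ2 idx y hy hr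
        rw [← hqsplit] at hyq
        rcases List.mem_append.mp hyq with h | h
        · exact Or.inl h
        · rw [List.mem_singleton] at h
          refine Or.inr ⟨h, ?_⟩
          have hidxlt : idx < gaps.length := by
            by_contra hge
            rw [List.getD_eq_default _ _ (Nat.not_lt.mp hge)] at hy
            cases hy
          have hidxcl : idx < cl.length := by
            have := hInv.1
            simp only at this
            omega
          have hp : cl[idx]? = some cl[idx] := List.getElem?_eq_getElem hidxcl
          have hyp : y ∈ cl[idx].1 := hInv.2.1 idx _ hp y hy
          subst h
          exact hW idx _ hp _ hyp
      obtain ⟨hx', hqx', hInv', hK', hJ2'⟩ :=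
        pvFold_inv cl C hCl (queue.getLast hq) (w.getD (queue.getLast hq) [])
          (gaps, removed, queue.dropLast) hx hqx hInv0 hK hJ2L
      have hmeas := pvFold_measure cl (queue.getLast hq) (w.getD (queue.getLast hq) [])
        (gaps, removed, queue.dropLast)
      have hql : queue.dropLast.length + 1 = queue.length := by
        have := List.length_pos_of_ne_nil hq
        simp only [List.length_dropLast]
        omega
      refine ih (n - 1) (by omega) _ _ _ (by simp only at hmeas ⊢; omega) hInv' hK' ?_
      intro idx y hy hr
      rcases hJ2' idx y hy hr with h | ⟨_, h⟩
      · exact h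
      · cases h

-- the build loop: watch lists cover every clause, the gap copies are the clause gaps,
-- removed and queue coincide, and empty-gap clauses have fired
theorem pvBuild_spec (C : List Char) :
    ∀ (rest pre : List (PySem.Set Char × Char)) (w : PySem.Dict Char (List Nat))
      (r : PySem.Set Char) (q : List Char),
    (∀ p ∈ pre ++ rest, (∀ x ∈ p.1, x ∈ C) → p.2 ∈ C) →
    (∀ (idx : Nat) (p : PySem.Set Char × Char), pre[idx]? = some p → ∀ x ∈ p.1, idx ∈ w.getD x []) →
    (∀ y, y ∈ r ↔ y ∈ q) → q.Nodup → (∀ y ∈ r, y ∈ C) →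
    (∀ (idx : Nat) (p : PySem.Set Char × Char), pre[idx]? = some p → p.1 = [] → p.2 ∈ r) →
    (pvBuild rest pre.length w (pre.map Prod.fst) r q).2.1 = (pre ++ rest).map Prod.fst ∧
    (∀ (idx : Nat) (p : PySem.Set Char × Char), (pre ++ rest)[idx]? = some p →
      ∀ x ∈ p.1, idx ∈ (pvBuild rest pre.length w (pre.map Prod.fst) r q).1.getD x []) ∧
    (∀ y, y ∈ (pvBuild rest pre.length w (pre.map Prod.fst) r q).2.2.1 ↔
      y ∈ (pvBuild rest pre.length w (pre.map Prod.fst) r q).2.2.2) ∧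
    (pvBuild rest pre.length w (pre.map Prod.fst) r q).2.2.2.Nodup ∧
    (∀ y ∈ (pvBuild rest pre.length w (pre.map Prod.fst) r q).2.2.1, y ∈ C) ∧
    (∀ (idx : Nat) (p : PySem.Set Char × Char), (pre ++ rest)[idx]? = some p → p.1 = [] →
      p.2 ∈ (pvBuild rest pre.length w (pre.map Prod.fst) r q).2.2.1) := by
  intro rest
  induction rest with
  | nil =>
    intro pre w r q hCl hw hrq hnd hK hJ3
    refine ⟨by simp [pvBuild], ?_, ?_, ?_, ?_, ?_⟩ <;>
      simp only [pvBuild, List.append_nil] <;> assumption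
  | cons e rest ih =>
    intro pre w r q hCl hw hrq hnd hK hJ3
    obtain ⟨gap, c⟩ := e
    have hassoc : pre ++ (gap, c) :: rest = (pre ++ [(gap, c)]) ++ rest := by
      rw [List.append_assoc]; rfl
    have hlen1 : pre.length + 1 = (pre ++ [(gap, c)]).length := by simp
    have hmap1 : pre.map Prod.fst ++ [gap] = (pre ++ [(gap, c)]).map Prod.fst := by simp
    -- index case analysis over the grown prefix
    have hidxcase : ∀ (idx : Nat) (p : PySem.Set Char × Char),
        (pre ++ [(gap, c)])[idx]? = some p →
        (idx < pre.length ∧ pre[idx]? = some p) ∨ (idx = pre.length ∧ p = (gap, c)) := by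
      intro idx p hidx
      have hlt : idx < pre.length + 1 := by
        have := (List.getElem?_eq_some_iff.mp hidx).1
        simpa using this
      by_cases h : idx < pre.length
      · left
        refine ⟨h, ?_⟩
        rw [List.getElem?_append_left h] at hidx
        exact hidx
      · right
        have he : idx = pre.length := by omega
        subst he
        rw [List.getElem?_concat_length] at hidx
        exact ⟨rfl, (Option.some.inj hidx).symm⟩
    -- the new watch dict covers the grown prefix
    have hw' : ∀ (idx : Nat) (p : PySem.Set Char × Char), (pre ++ [(gap, c)])[idx]? = some p → ∀ x ∈ p.1,
        idx ∈ (gap.foldl (fun d x => d.insert x (d.getD x [] ++ [pre.length])) w).getD x [] := by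
      intro idx p hidx x hx
      rcases hidxcase idx p hidx with ⟨_, hp⟩ | ⟨he, hp⟩
      · exact pvWatch_fold_mono gap w pre.length x idx (hw idx p hp x hx)
      · subst he
        rw [hp] at hx
        exact pvWatch_fold_self gap w pre.length x hx
    have hCl' : ∀ p ∈ (pre ++ [(gap, c)]) ++ rest, (∀ x ∈ p.1, x ∈ C) → p.2 ∈ C := by
      rw [← hassoc]; exact hCl
    rw [pvBuild]
    simp only [hmap1]
    split_ifs with hfire
    · obtain ⟨hge, hnr⟩ := hfire
      have hcC : c ∈ C := by
        apply hCl (gap, c) (List.mem_append_right _ List.mem_cons_self)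
        intro x hx
        rw [hge] at hx
        cases hx
      have hcq : c ∉ q := fun h => hnr ((hrq c).mpr h)
      have hrq' : ∀ y, y ∈ PySem.Set.add r c ↔ y ∈ q ++ [c] := by
        intro y
        rw [PySem.Set.mem_add, List.mem_append, List.mem_singleton, hrq y]
      have hnd' : (q ++ [c]).Nodup := by
        rw [List.nodup_append]
        refine ⟨hnd, List.nodup_singleton _, ?_⟩
        intro a ha b hb
        rw [List.mem_singleton] at hb
        subst hb
        intro hab
        subst hab
        exact hcq ha
      have hK' : ∀ y ∈ PySem.Set.add r c, y ∈ C := by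
        intro y hy
        rcases (PySem.Set.mem_add _ _ _).mp hy with hy | hy
        · exact hK y hy
        · subst hy; exact hcC
      have hJ3' : ∀ (idx : Nat) (p : PySem.Set Char × Char), (pre ++ [(gap, c)])[idx]? = some p → p.1 = [] →
          p.2 ∈ PySem.Set.add r c := by
        intro idx p hidx hp1
        rcases hidxcase idx p hidx with ⟨_, hp⟩ | ⟨_, hp⟩
        · exact (PySem.Set.mem_add _ _ _).mpr (Or.inl (hJ3 idx p hp hp1))
        · subst hp
          exact (PySem.Set.mem_add _ _ _).mpr (Or.inr rfl)
      have := ih (pre ++ [(gap, c)]) _ (PySem.Set.add r c) (q ++ [c])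
        hCl' hw' hrq' hnd' hK' hJ3'
      rw [← hassoc, ← hlen1] at this
      exact this
    · have hJ3' : ∀ (idx : Nat) (p : PySem.Set Char × Char), (pre ++ [(gap, c)])[idx]? = some p → p.1 = [] → p.2 ∈ r := by
        intro idx p hidx hp1
        rcases hidxcase idx p hidx with ⟨_, hp⟩ | ⟨_, hp⟩
        · exact hJ3 idx p hp hp1
        · subst hp
          rcases not_and_or.mp hfire with h | h
          · exact absurd hp1 h
          · exact not_not.mp h
      have := ih (pre ++ [(gap, c)]) _ r q hCl' hw' hrq hnd hK hJ3'
      rw [← hassoc, ← hlen1] at this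
      exact this

-- B's removed set, named for the proofs (definitionally the one the port computes)
def pvRemovedB (l : List Char) : PySem.Set Char :=
  pvProp (pvClauses l)
    (pvBuild (pvClauses l) 0 PySem.Dict.empty [] PySem.Set.empty []).1
    (pvBuild (pvClauses l) 0 PySem.Dict.empty [] PySem.Set.empty []).2.1
    (pvBuild (pvClauses l) 0 PySem.Dict.empty [] PySem.Set.empty []).2.2.1
    (pvBuild (pvClauses l) 0 PySem.Dict.empty [] PySem.Set.empty []).2.2.2

theorem pvRemovedB_props (l : List Char) (C : List Char) (hC : pvCClosed l C) :
    (∀ y ∈ pvRemovedB l, y ∈ C) ∧ pvCClosed l (pvRemovedB l) := by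
  obtain ⟨hgs, hw, hrq, hnd, hK, hJ3⟩ := pvBuild_spec C (pvClauses l) [] PySem.Dict.empty
    PySem.Set.empty []
    (by intro p hp; rw [List.nil_append] at hp; exact hC p hp)
    (by intro idx p h; cases idx <;> cases h)
    (by intro y; constructor <;> (intro h; cases h))
    List.nodup_nil
    (by intro y h; cases h)
    (by intro idx p h; cases idx <;> cases h)
  simp only [List.nil_append, List.length_nil, List.map_nil] at hgs hw hrq hnd hK hJ3
  have hgetD : ∀ idx (p : PySem.Set Char × Char), (pvClauses l)[idx]? = some p →
      (pvBuild (pvClauses l) 0 PySem.Dict.empty [] PySem.Set.empty []).2.1.getD idx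
        PySem.Set.empty = p.1 := by
    intro idx p hidx
    rw [List.getD_eq_getElem?_getD, hgs, List.getElem?_map, hidx]
    rfl
  have hInv : pvInvB (pvClauses l)
      ((pvBuild (pvClauses l) 0 PySem.Dict.empty [] PySem.Set.empty []).2.1,
       (pvBuild (pvClauses l) 0 PySem.Dict.empty [] PySem.Set.empty []).2.2.1,
       (pvBuild (pvClauses l) 0 PySem.Dict.empty [] PySem.Set.empty []).2.2.2) := by
    refine ⟨by rw [hgs]; simp, ?_, ?_, ?_, ?_, hnd⟩
    · intro idx p hidx y hy
      rw [hgetD idx p hidx] at hy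
      exact hy
    · intro idx p hidx he
      rw [hgetD idx p hidx] at he
      exact hJ3 idx p hidx he
    · intro idx p hidx y hy hng
      rw [hgetD idx p hidx] at hng
      exact absurd hy hng
    · intro y hy
      exact (hrq y).mpr hy
  have hmain := pvProp_inv (pvClauses l)
    (pvBuild (pvClauses l) 0 PySem.Dict.empty [] PySem.Set.empty []).1 C hC hw
    ((pvBuild (pvClauses l) 0 PySem.Dict.empty [] PySem.Set.empty []).2.2.2.length
      + 2 * pvFree (pvClauses l)
          (pvBuild (pvClauses l) 0 PySem.Dict.empty [] PySem.Set.empty []).2.2.1)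
    (pvBuild (pvClauses l) 0 PySem.Dict.empty [] PySem.Set.empty []).2.1
    (pvBuild (pvClauses l) 0 PySem.Dict.empty [] PySem.Set.empty []).2.2.1
    (pvBuild (pvClauses l) 0 PySem.Dict.empty [] PySem.Set.empty []).2.2.2
    le_rfl hInv hK
    (by
      intro idx y hy hr
      exact (hrq y).mp hr)
  exact ⟨hmain.1, hmain.2⟩

-- the two removed sets coincide
theorem pv_sets_eq (l : List Char) :
    ∀ y, y ∈ pvRefLoop l PySem.Set.empty ↔ y ∈ pvRemovedB l := by
  have hRc : pvCClosed l (pvRefLoop l PySem.Set.empty) :=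
    pvRefLoop_closed (l.filter (fun c => !PySem.Set.contains PySem.Set.empty c)).length
      l PySem.Set.empty le_rfl
  obtain ⟨hsub, hBclosed⟩ := pvRemovedB_props l _ hRc
  intro y
  constructor
  · intro hy
    exact pvRefLoop_min (l.filter (fun c => !PySem.Set.contains PySem.Set.empty c)).length
      l PySem.Set.empty (pvRemovedB l) le_rfl hBclosed (by intro x hx; cases hx) y hy
  · intro hy
    exact hsub y hy

-- ===== VERDICT (by name: the statement is the Claim_ definition above) =====
theorem eliminate_consecutive_characters_spec : Claim_equal_eliminate_consecutive_characters := by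
  intro s _
  unfold Spec_eliminate_consecutive_characters eliminate_consecutive_characters
    eliminate_consecutive_characters_alt
  have hA := pv_main
    (s.toList.filter (fun c => !PySem.Set.contains PySem.Set.empty c)).length
    s.toList PySem.Set.empty le_rfl
  have hempty : s.toList.filter (fun c => !PySem.Set.contains PySem.Set.empty c)
      = s.toList := by
    apply List.filter_eq_self.mpr
    intro a _
    simp [PySem.Set.empty]
  rw [hempty] at hA
  rw [hA]
  refine congrArg String.ofList ?_
  apply List.filter_congr
  intro x _
  have hiff := pv_sets_eq s.toList x
  have hcont : PySem.Set.contains (pvRefLoop s.toList PySem.Set.empty) x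
      = PySem.Set.contains (pvRemovedB s.toList) x := by
    rw [Bool.eq_iff_iff, PySem.Set.contains_iff, PySem.Set.contains_iff]
    exact hiff
  exact congrArg (fun b => !b) hcont
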